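-- pv_equiv track=rewrite | github.com/gargpriyal10/Autonomous-Security-Policy-Reasoning-Misconfiguration-Detection-Platform | core/policy_engine.py | calculate_service_risk
-- ===== SOURCE A (Python) =====
-- def calculate_service_risk(issues):
--     service_risk = {}
--
--     for issue in issues:
--         service = issue.get("service", "Other")
--
--         if service not in service_risk:
--             service_risk[service] = {"count": 0, "risk_score": 0}
--
--         service_risk[service]["count"] += 1
--         service_risk[service]["risk_score"] += 10
--
--     return service_risk
-- ===== SOURCE B (Python) =====
-- def calculate_service_risk(issues):
--     services = [issue.get("service", "Other") for issue in issues]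
--     result = {}
--     for s in services:
--         if s not in result:
--             c = services.count(s)
--             result[s] = {"count": c, "risk_score": 10 * c}
--     return result
-- ===== Notes on version B (the rewrite author's own statement) =====
-- stated objective: alternative
-- what changed: A builds the result in one pass, incrementing count and risk_score inside a dict-of-dicts as each issue arrives; B keeps no running tallies at all: it extracts the service-name list, and for each first occurrence computes the total directly with a full list.count scan, emitting the finished entry {'count': c, 'risk_score': 10*c} at once.
import Mathlib
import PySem

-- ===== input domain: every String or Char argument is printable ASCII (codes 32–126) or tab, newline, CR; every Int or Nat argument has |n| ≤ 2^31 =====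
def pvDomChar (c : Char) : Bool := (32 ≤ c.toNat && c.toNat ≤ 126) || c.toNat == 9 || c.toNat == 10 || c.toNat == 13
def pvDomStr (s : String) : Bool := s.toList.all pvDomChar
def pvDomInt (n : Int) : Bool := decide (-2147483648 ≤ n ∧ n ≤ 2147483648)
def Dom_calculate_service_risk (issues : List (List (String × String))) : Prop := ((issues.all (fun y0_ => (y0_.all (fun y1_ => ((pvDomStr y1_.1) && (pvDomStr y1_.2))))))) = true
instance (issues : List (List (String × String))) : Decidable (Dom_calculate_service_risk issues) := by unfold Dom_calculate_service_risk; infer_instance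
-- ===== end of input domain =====

-- A tallies count and risk incrementally in a dict-of-dicts; B keeps no running tallies:
-- it dedupes the service-name list and computes each total with a full list.count scan (objective: alternative).


-- ===== PORT A =====
-- literal port: build a dict of dicts, bumping "count" by 1 and "risk_score" by 10 per issue
def calculate_service_risk (issues : List (List (String × String))) : List (String × List (String × Int)) :=
  let service_risk : PySem.Dict String (PySem.Dict String Int) :=
    issues.foldl (fun service_risk issue =>
      let service := (PySem.Dict.ofList issue).getD "service" "Other"
      let service_risk :=
        if service_risk.contains service then service_risk
        else service_risk.insert service (PySem.Dict.ofList [("count", (0 : Int)), ("risk_score", 0)])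
      let service_risk :=
        service_risk.modify service PySem.Dict.empty (fun inner => inner.modify "count" 0 (· + 1))
      service_risk.modify service PySem.Dict.empty (fun inner => inner.modify "risk_score" 0 (· + 10)))
      PySem.Dict.empty
  service_risk.items.map (fun p => (p.1, p.2.items))

-- ===== PORT B =====
-- port of Source B: extract the service-name list; on each first occurrence, compute the total
-- with a full services.count scan and emit the finished entry at once
def calculate_service_risk_alt (issues : List (List (String × String))) : List (String × List (String × Int)) :=
  let services := issues.map (fun issue => (PySem.Dict.ofList issue).getD "service" "Other")
  let result : PySem.Dict String (PySem.Dict String Int) :=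
    services.foldl (fun result s =>
      if result.contains s then result
      else
        let c : Int := services.count s
        result.insert s (PySem.Dict.ofList [("count", c), ("risk_score", 10 * c)]))
      PySem.Dict.empty
  result.items.map (fun p => (p.1, p.2.items))

-- ===== PRECONDITION & SPEC =====
def Spec_calculate_service_risk (issues : List (List (String × String))) (out : List (String × List (String × Int))) : Prop := out = calculate_service_risk_alt issues
instance (issues : List (List (String × String))) (out : List (String × List (String × Int))) : Decidable (Spec_calculate_service_risk issues out) := by unfold Spec_calculate_service_risk; infer_instance

-- ===== CLAIM (what is proved, stated in full; the proofs are below) =====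
def Claim_equal_calculate_service_risk : Prop := ∀ (issues : List (List (String × String))), Dom_calculate_service_risk issues → Spec_calculate_service_risk issues (calculate_service_risk issues)

-- ===== LEMMAS AND PROOFS =====

-- the simulation map: a count c corresponds to A's inner dict {"count": c, "risk_score": c*10}
def pvF (p : String × Int) : String × PySem.Dict String Int :=
  (p.1, PySem.Dict.mk [("count", p.2), ("risk_score", p.2 * 10)])

-- A's loop body and a counting loop body, applied to an already-extracted service name
def pvStepA (d : PySem.Dict String (PySem.Dict String Int)) (s : String) :
    PySem.Dict String (PySem.Dict String Int) :=
  let d1 := if d.contains s then d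
            else d.insert s (PySem.Dict.ofList [("count", (0 : Int)), ("risk_score", 0)])
  let d2 := d1.modify s PySem.Dict.empty (fun inner => inner.modify "count" 0 (· + 1))
  d2.modify s PySem.Dict.empty (fun inner => inner.modify "risk_score" 0 (· + 10))

def pvStepB (d : PySem.Dict String Int) (s : String) : PySem.Dict String Int :=
  d.insert s (d.getD s 0 + 1)

lemma pvKeys_map (dB : PySem.Dict String Int) :
    (PySem.Dict.mk (dB.items.map pvF)).keys = dB.keys := by
  simp [PySem.Dict.keys, pvF, Function.comp]

lemma pvContains_map (dB : PySem.Dict String Int) (s : String) :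
    (PySem.Dict.mk (dB.items.map pvF)).contains s = dB.contains s := by
  rw [PySem.Dict.contains_eq_decide_mem_keys, PySem.Dict.contains_eq_decide_mem_keys, pvKeys_map]

lemma pvStep_sim (dB : PySem.Dict String Int) (hnd : dB.keys.Nodup) (s : String) :
    pvStepA (PySem.Dict.mk (dB.items.map pvF)) s = PySem.Dict.mk ((pvStepB dB s).items.map pvF) := by
  by_cases hc : dB.contains s = true
  · obtain ⟨c, hget⟩ : ∃ c, dB.get? s = some c := by
      rw [PySem.Dict.contains_eq_isSome_get?] at hc
      exact Option.isSome_iff_exists.mp hc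
    have hcd : dB.getD s 0 = c := PySem.Dict.getD_of_get?_eq_some dB 0 hget
    have hmem : (s, c) ∈ dB.items := PySem.Dict.mem_items_of_get?_eq_some _ hget
    have hndF : (PySem.Dict.mk (dB.items.map pvF)).keys.Nodup := by rw [pvKeys_map]; exact hnd
    have hgetD : (PySem.Dict.mk (dB.items.map pvF)).getD s PySem.Dict.empty
        = PySem.Dict.mk [("count", c), ("risk_score", c * 10)] :=
      PySem.Dict.getD_of_mem_items _ (List.mem_map_of_mem (f := pvF) hmem) hndF PySem.Dict.empty
    have hcF : (PySem.Dict.mk (dB.items.map pvF)).contains s = true := by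
      rw [pvContains_map]; exact hc
    unfold pvStepA pvStepB
    simp only [hcF, if_pos, PySem.Dict.modify, PySem.Dict.getD_insert_self,
      PySem.Dict.insert_insert_self, hgetD, hcd]
    apply PySem.Dict.ext
    rw [PySem.Dict.items_insert_of_contains _ _ hcF,
        PySem.Dict.items_insert_of_contains _ _ hc]
    show (dB.items.map pvF).map _ = (dB.items.map _).map pvF
    rw [List.map_map, List.map_map]
    apply List.map_congr_left
    intro q _
    by_cases hq : q.1 = s
    · simp [pvF, hq, PySem.Dict.insert, PySem.Dict.getD,
        PySem.Dict.get?, PySem.Dict.contains]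
      ring_nf
    · simp [pvF, Function.comp, hq]
  · rw [Bool.not_eq_true] at hc
    have hcF : (PySem.Dict.mk (dB.items.map pvF)).contains s = false := by
      rw [pvContains_map]; exact hc
    have hcd : dB.getD s 0 = 0 := PySem.Dict.getD_of_not_contains dB 0 hc
    unfold pvStepA pvStepB
    simp only [hcF, Bool.false_eq_true, if_false, PySem.Dict.modify,
      PySem.Dict.getD_insert_self, PySem.Dict.insert_insert_self, hcd]
    apply PySem.Dict.ext
    rw [PySem.Dict.items_insert_of_not_contains _ _ hcF,
        PySem.Dict.items_insert_of_not_contains _ _ hc]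
    rw [List.map_append]
    congr 1

lemma pvFold_sim (issues : List (List (String × String))) (dB : PySem.Dict String Int)
    (hnd : dB.keys.Nodup) :
    issues.foldl (fun d issue =>
        pvStepA d ((PySem.Dict.ofList issue).getD "service" "Other"))
      (PySem.Dict.mk (dB.items.map pvF))
    = PySem.Dict.mk ((issues.foldl (fun d issue =>
        pvStepB d ((PySem.Dict.ofList issue).getD "service" "Other")) dB).items.map pvF) := by
  induction issues generalizing dB with
  | nil => rfl
  | cons issue rest ih =>
    simp only [List.foldl_cons]
    rw [pvStep_sim dB hnd]
    exact ih _ (PySem.Dict.nodup_keys_insert _ _ _ hnd)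

-- B's guarded fresh-insert loop from empty produces exactly one item per distinct name,
-- in first-occurrence order
lemma pvGuardFold_items (l : List String) (v : String → PySem.Dict String Int) :
    (l.foldl (fun r s => if r.contains s then r else r.insert s (v s)) PySem.Dict.empty).items
    = (PySem.Set.ofList l).map (fun s => (s, v s)) := by
  induction l using List.reverseRecOn with
  | nil => rfl
  | append_singleton xs x ih =>
    rw [List.foldl_append, List.foldl_cons, List.foldl_nil, PySem.Set.ofList_append_singleton]
    set r := xs.foldl (fun r s => if r.contains s then r else r.insert s (v s)) PySem.Dict.empty with hr
    have hkeys : r.keys = PySem.Set.ofList xs := by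
      have : r.keys = r.items.map (·.1) := rfl
      rw [this, ih, List.map_map]
      exact List.map_id _
    have hcon : r.contains x = decide (x ∈ PySem.Set.ofList xs) := by
      rw [PySem.Dict.contains_eq_decide_mem_keys, hkeys]
    by_cases hx : x ∈ PySem.Set.ofList xs
    · rw [PySem.Set.add_of_mem hx]
      simp only [hcon, hx, decide_true, if_pos, ih]
    · have hcf : r.contains x = false := by rw [hcon]; simp [hx]
      rw [PySem.Set.add_of_not_mem hx]
      simp only [hcf, Bool.false_eq_true, if_false]
      rw [PySem.Dict.items_insert_of_not_contains _ _ hcf, ih, List.map_append]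
      rfl

-- the two-key literal inner dict of B
lemma pvInner_items (c : Int) :
    (PySem.Dict.ofList [("count", c), ("risk_score", 10 * c)] : PySem.Dict String Int).items
    = [("count", c), ("risk_score", 10 * c)] := by
  simp [PySem.Dict.ofList, PySem.Dict.update, PySem.Dict.insert, PySem.Dict.empty,
    PySem.Dict.contains]

-- ===== VERDICT (by name: the statement is the Claim_ definition above) =====
theorem calculate_service_risk_spec : Claim_equal_calculate_service_risk := by
  intro issues _
  show _ = _
  unfold calculate_service_risk calculate_service_risk_alt
  dsimp only
  have h := pvFold_sim issues PySem.Dict.empty (by simp)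
  simp only [pvStepA, pvStepB] at h
  conv_lhs => rw [show (PySem.Dict.empty : PySem.Dict String (PySem.Dict String Int)) =
        PySem.Dict.mk (((PySem.Dict.empty : PySem.Dict String Int)).items.map pvF) from rfl]
  rw [h]
  have hc : issues.foldl (fun d issue =>
        d.insert ((PySem.Dict.ofList issue).getD "service" "Other")
          (d.getD ((PySem.Dict.ofList issue).getD "service" "Other") 0 + 1)) PySem.Dict.empty
      = PySem.Dict.counter (issues.map (fun issue => (PySem.Dict.ofList issue).getD "service" "Other")) := by
    rw [← PySem.Dict.foldl_insert_getD_add_one_eq_counter, List.foldl_map]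
  rw [hc]
  rw [pvGuardFold_items]
  rw [PySem.Dict.items_counter]
  simp only [List.map_map]
  apply List.map_congr_left
  intro s _
  simp [pvF, pvInner_items, Int.mul_comm]
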